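-- pv_equiv track=rewrite | github.com/Mousie/GwtS-Show-Sequencer | GwtSUtils.py | encode_ir
-- ===== SOURCE A (Python) =====
-- def encode_ir(values, message_width=417):
--     """ Encodes a complete command into IR compatible on/off time lengths.
--     :param values: int[] Command to be encoded for IR
--     :param message_width: int Optional variable to change the message width.
--     :return: int[] Encoded array of values for IR transmission.
--     """
--     return_list = []
--     for value in values:
--         # Commands always have initial on start bit
--         high = False
--         return_list.append(message_width)
--         # Cycle through bits for on/off bits and add/flip as needed.
--         for count in range(8):
--             if value >> count & 1 == high:
--                 return_list[-1] += message_width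
--             else:
--                 return_list.append(message_width)
--                 high = not high
--         # End with off bit
--         if high:
--             return_list[-1] += message_width
--         else:
--             return_list.append(message_width)
--     return return_list
-- ===== SOURCE B (Python) =====
-- def _runs(symbols):
--     """Run lengths of consecutive equal symbols in a non-empty list."""
--     runs = []
--     prev = symbols[0]
--     n = 0
--     for s in symbols:
--         if s == prev:
--             n += 1
--         else:
--             runs.append(n)
--             prev = s
--             n = 1
--     runs.append(n)
--     return runs
--
--
-- def encode_ir(values, message_width=417):
--     out = []
--     for value in values:
--         symbols = [0] + [(value >> c) & 1 for c in range(8)] + [1]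
--         for n in _runs(symbols):
--             out.append(n * message_width)
--     return out
-- ===== Notes on version B (the rewrite author's own statement) =====
-- stated objective: alternative
-- what changed: Replaces A's fused append/last-increment bit state machine with a two-stage pass per value: build the explicit symbol list [0]+bits+[1], then run-length-encode it and emit run*message_width.
import Mathlib
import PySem

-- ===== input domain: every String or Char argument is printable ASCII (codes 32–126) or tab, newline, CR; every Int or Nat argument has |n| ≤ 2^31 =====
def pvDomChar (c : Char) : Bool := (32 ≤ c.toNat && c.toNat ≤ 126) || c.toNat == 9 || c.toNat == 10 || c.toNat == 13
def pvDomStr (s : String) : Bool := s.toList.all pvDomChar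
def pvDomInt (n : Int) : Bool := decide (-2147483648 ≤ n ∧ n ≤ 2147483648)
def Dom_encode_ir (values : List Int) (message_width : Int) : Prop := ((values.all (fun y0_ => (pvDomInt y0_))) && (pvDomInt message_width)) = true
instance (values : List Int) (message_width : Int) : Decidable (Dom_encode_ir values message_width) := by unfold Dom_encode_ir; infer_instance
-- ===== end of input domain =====

-- B replaces A's fused append/extend bit state machine by an explicit symbol list
-- (0 :: bits ++ [1]) collapsed into run lengths; alternative decomposition, same cost.

-- ===== PORT A =====
-- return_list[-1] += message_width  (list is never empty when A does this)
def pvIncLast (l : List Int) (mw : Int) : List Int :=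
  match l with
  | [] => []
  | [x] => [x + mw]
  | x :: xs => x :: pvIncLast xs mw

-- one iteration of A's inner `for count in range(8)` body; state = (return_list, high)
-- Python compares `value >> count & 1 == high` (int vs bool): True iff bit = (1 if high else 0)
def pvBitStep (mw value : Int) (st : List Int × Bool) (count : Nat) : List Int × Bool :=
  if PySem.Int.band (value >>> count) 1 = (if st.2 then 1 else 0) then
    (pvIncLast st.1 mw, st.2)
  else
    (st.1 ++ [mw], !st.2)

def encode_ir (values : List Int) (message_width : Int) : List Int :=
  values.foldl
    (fun return_list value =>
      let st := (List.range 8).foldl (pvBitStep message_width value)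
                  (return_list ++ [message_width], false)
      if st.2 then pvIncLast st.1 message_width else st.1 ++ [message_width])
    []

-- ===== PORT B =====
-- the list comprehension [(value >> c) & 1 for c in range(8)]
def pvBits (value : Int) : List Int :=
  (List.range 8).map (fun (c : Nat) => PySem.Int.band (value >>> c) 1)

-- Source B's _runs: prev = symbols[0], n = 0, then one pass appending a count at each transition
def pvRunsAux (prev n : Int) : List Int → List Int
  | [] => [n]
  | s :: rest => if s = prev then pvRunsAux prev (n + 1) rest else n :: pvRunsAux s 1 rest

def pvRuns (symbols : List Int) : List Int :=
  match symbols with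
  | [] => []            -- never reached: Source B's symbol lists are non-empty
  | s :: _ => pvRunsAux s 0 symbols

def encode_ir_alt (values : List Int) (message_width : Int) : List Int :=
  values.foldl
    (fun out value =>
      let symbols := 0 :: pvBits value ++ [1]
      out ++ (pvRuns symbols).map (fun n => n * message_width))
    []

-- ===== PRECONDITION & SPEC =====
def Spec_encode_ir (values : List Int) (message_width : Int) (out : List Int) : Prop := out = encode_ir_alt values message_width
instance (values : List Int) (message_width : Int) (out : List Int) : Decidable (Spec_encode_ir values message_width out) := by unfold Spec_encode_ir; infer_instance

-- ===== CLAIM (what is proved, stated in full; the proofs are below) =====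
def Claim_equal_encode_ir : Prop := ∀ (values : List Int) (message_width : Int), Dom_encode_ir values message_width → Spec_encode_ir values message_width (encode_ir values message_width)

-- ===== LEMMAS AND PROOFS =====

theorem pv_band_one01 (x : Int) : PySem.Int.band x 1 = 0 ∨ PySem.Int.band x 1 = 1 := by
  unfold PySem.Int.band
  rcases x with m | m
  · simp [Nat.and_one_is_mod]; omega
  · simp; omega

theorem pvIncLast_append (rl : List Int) (x mw : Int) :
    pvIncLast (rl ++ [x]) mw = rl ++ [x + mw] := by
  induction rl with
  | nil => rfl
  | cons a as ih =>
      cases as with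
      | nil => simp [pvIncLast]
      | cons b bs => simpa [pvIncLast] using ih

-- A's bit step, abstracted over the already-computed symbol
def pvGenStep (mw : Int) (st : List Int × Bool) (b : Int) : List Int × Bool :=
  if b = (if st.2 then 1 else 0) then (pvIncLast st.1 mw, st.2) else (st.1 ++ [mw], !st.2)

theorem pv_fold_runs (mw : Int) (syms : List Int) :
    ∀ (rl : List Int) (high : Bool) (n : Int),
      (∀ s ∈ syms, s = 0 ∨ s = 1) →
      (List.foldl (pvGenStep mw) (rl ++ [n * mw], high) syms).1
        = rl ++ (pvRunsAux (if high then 1 else 0) n syms).map (fun k => k * mw) := by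
  induction syms with
  | nil => intro rl high n _; simp [pvRunsAux]
  | cons s rest ih =>
      intro rl high n hall
      have hs := hall s (by simp)
      have hrest : ∀ x ∈ rest, x = 0 ∨ x = 1 := fun x hx => hall x (by simp [hx])
      by_cases h : s = (if high then 1 else 0)
      · have step : pvGenStep mw (rl ++ [n * mw], high) s = (rl ++ [(n + 1) * mw], high) := by
          simp [pvGenStep, h, pvIncLast_append]; ring
        rw [List.foldl_cons, step, pvRunsAux, if_pos h]
        exact ih rl high (n + 1) hrest
      · have step : pvGenStep mw (rl ++ [n * mw], high) s = ((rl ++ [n * mw]) ++ [mw], !high) := by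
          simp [pvGenStep, h]
        have hprev : (if !high then (1 : Int) else 0) = s := by
          cases high <;> rcases hs with h0 | h0 <;> simp_all
        rw [List.foldl_cons, step, pvRunsAux, if_neg h]
        have := ih (rl ++ [n * mw]) (!high) 1 hrest
        rw [show ((rl ++ [n * mw]) ++ [(1 : Int) * mw]) = (rl ++ [n * mw]) ++ [1 * mw] from rfl] at this
        simp only [one_mul] at this
        rw [this, hprev]
        simp

-- A's trailing "end with off bit" step equals one pvGenStep with symbol 1
theorem pv_endstep (mw : Int) (st : List Int × Bool) :
    (if st.2 then pvIncLast st.1 mw else st.1 ++ [mw]) = (pvGenStep mw st 1).1 := by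
  rcases st with ⟨l, high⟩; cases high <;> simp [pvGenStep]

-- per-value equality of the two folded step functions
theorem pv_chunk_eq (mw value : Int) (rl : List Int) :
    (let st := (List.range 8).foldl (pvBitStep mw value) (rl ++ [mw], false)
     if st.2 then pvIncLast st.1 mw else st.1 ++ [mw])
    = rl ++ (pvRuns (0 :: (pvBits value) ++ [1])).map
        (fun n => n * mw) := by
  have hbits : ∀ s ∈ (pvBits value) ++ [1], s = 0 ∨ s = 1 := by
    intro s hs
    rcases List.mem_append.mp hs with hs | hs
    · simp only [pvBits, List.mem_map, List.mem_range] at hs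
      obtain ⟨c, -, rfl⟩ := hs
      exact pv_band_one01 _
    · simp at hs; right; exact hs
  have hfold : (List.range 8).foldl (pvBitStep mw value) (rl ++ [mw], false)
      = List.foldl (pvGenStep mw) (rl ++ [mw], false) (pvBits value) := by
    rw [pvBits, List.foldl_map]; rfl
  have hrun := pv_fold_runs mw ((pvBits value) ++ [1]) rl false 1 hbits
  simp only [one_mul, Bool.false_eq_true, if_false, List.foldl_append, List.foldl_cons,
    List.foldl_nil] at hrun
  have hr : pvRuns (0 :: (pvBits value) ++ [1]) = pvRunsAux 0 1 ((pvBits value) ++ [1]) := by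
    simp [pvRuns, pvRunsAux]
  show (if (List.foldl (pvGenStep mw)
        ((List.range 8).foldl (pvBitStep mw value) (rl ++ [mw], false)) []).2 then _ else _) = _
  simp only [List.foldl_nil, hfold, pv_endstep, hr]
  exact hrun

theorem pv_foldl_pointwise {α β : Type} (f g : α → β → α) (h : ∀ a b, f a b = g a b) :
    ∀ (l : List β) (a : α), List.foldl f a l = List.foldl g a l := by
  intro l
  induction l with
  | nil => intro a; rfl
  | cons b bs ih => intro a; rw [List.foldl_cons, List.foldl_cons, h]; exact ih _

-- ===== VERDICT (by name: the statement is the Claim_ definition above) =====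
theorem encode_ir_spec : Claim_equal_encode_ir := by
  intro values mw _
  unfold Spec_encode_ir encode_ir encode_ir_alt
  exact pv_foldl_pointwise _ _ (fun rl v => pv_chunk_eq mw v rl) values []
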